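-- pv_equiv track=rewrite | github.com/JiminiiiKim/Programmers | Python/[프로그래머스] 문자열 밀기.py | solution
-- ===== SOURCE A (Python) =====
-- def solution(A, B):
--     answer = 0
--     temp = B
--
--     for i in range(1, len(B)+1) :
--         if temp == A :
--             return answer
--         temp = B[i:] + B[:i]
--         answer += 1
--     answer = -1
--     return answer
-- ===== SOURCE B (Python) =====
-- def solution(A, B):
--     if len(A) != len(B):
--         return -1
--     return (B + B).find(A)
-- ===== Notes on version B (the rewrite author's own statement) =====
-- stated objective: faster
-- what changed: Replaces the loop that materialises every rotation of B and compares it to A by a single substring search of A in B+B (first occurrence index = smallest shift), guarded by a length check.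
-- intended difference: On the single input A == '' and B == '', A's loop body never runs so A returns -1, while B returns 0; 0 is intended because the empty string is trivially the 0-shift rotation of itself. — e.g. on solution("", ""): A returns -1, B returns 0
import Mathlib
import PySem

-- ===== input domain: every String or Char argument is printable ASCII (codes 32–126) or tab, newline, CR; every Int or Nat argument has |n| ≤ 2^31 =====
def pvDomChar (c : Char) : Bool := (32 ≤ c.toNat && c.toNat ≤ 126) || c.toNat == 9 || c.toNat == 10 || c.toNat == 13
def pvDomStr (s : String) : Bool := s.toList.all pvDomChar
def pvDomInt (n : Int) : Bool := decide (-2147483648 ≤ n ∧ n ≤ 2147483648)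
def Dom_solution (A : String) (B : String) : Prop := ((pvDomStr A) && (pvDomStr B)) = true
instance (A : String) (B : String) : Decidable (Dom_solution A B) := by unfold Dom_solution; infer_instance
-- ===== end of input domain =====

-- B replaces A's rotate-and-compare loop by one substring search of A in B+B (length-guarded); measured faster.
-- ===== PORT A =====
-- the 'for i in range(1, len(B)+1)' loop with its early return; state = (answer, temp)
def solGo (Al Bl : List Char) : List Int → Int → List Char → Int
  | [], _, _ => -1
  | i :: rest, answer, temp =>
      if temp = Al then answer
      else solGo Al Bl rest (answer + 1)
             (PySem.List.slice Bl (some i) none ++ PySem.List.slice Bl none (some i))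

def solution (A : String) (B : String) : Int :=
  solGo A.toList B.toList (PySem.List.pyRange 1 (PySem.Str.len B + 1)) 0 B.toList

-- ===== PORT B =====
def solution_alt (A : String) (B : String) : Int :=
  if PySem.Str.len A ≠ PySem.Str.len B then -1
  else PySem.Chars.find (B.toList ++ B.toList) A.toList

-- ===== PRECONDITION & SPEC =====
-- On the single input A == "" and B == "", A's loop body never runs so A returns -1, while B returns 0;
-- 0 is intended because the empty string is trivially the 0-shift rotation of itself.
def D_solution (A : String) (B : String) : Prop := A = "" ∧ B = ""
instance (A : String) (B : String) : Decidable (D_solution A B) := by unfold D_solution; infer_instance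

def Spec_solution (A : String) (B : String) (out : Int) : Prop := ¬ D_solution A B → out = solution_alt A B
instance (A : String) (B : String) (out : Int) : Decidable (Spec_solution A B out) := by unfold Spec_solution; infer_instance

def pvDiffWitness_solution : String × String := ("", "")
def pvDiffWitnessOut_solution : Int × Int := (-1, 0)

-- ===== CLAIM (what is proved, stated in full; the proofs are below) =====
def Claim_unchanged_solution : Prop := ∀ (A : String) (B : String), Dom_solution A B → Spec_solution A B (solution A B)
def Claim_changed_solution : Prop := Dom_solution (pvDiffWitness_solution.1) (pvDiffWitness_solution.2) ∧ D_solution (pvDiffWitness_solution.1) (pvDiffWitness_solution.2) ∧ solution (pvDiffWitness_solution.1) (pvDiffWitness_solution.2) = pvDiffWitnessOut_solution.1 ∧ solution_alt (pvDiffWitness_solution.1) (pvDiffWitness_solution.2) = pvDiffWitnessOut_solution.2 ∧ pvDiffWitnessOut_solution.1 ≠ pvDiffWitnessOut_solution.2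
def Claim_exact_solution : Prop := ∀ (A : String) (B : String), Dom_solution A B → D_solution A B → solution A B ≠ solution_alt A B

-- ===== LEMMAS AND PROOFS =====

-- first k in [start, start+fuel) with rotation-by-k of b equal to a, else -1
def firstRot (a b : List Char) : Nat → Nat → Int
  | _, 0 => -1
  | k, fuel + 1 => if b.drop k ++ b.take k = a then (k : Int) else firstRot a b (k + 1) fuel

theorem firstRot_none (a b : List Char) (fuel : Nat) :
    ∀ k, (∀ j, k ≤ j → j < k + fuel → b.drop j ++ b.take j ≠ a) → firstRot a b k fuel = -1 := by
  induction fuel with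
  | zero => intro k _; rfl
  | succ m ih =>
      intro k h
      have hk : b.drop k ++ b.take k ≠ a := h k le_rfl (by omega)
      simp only [firstRot, if_neg hk]
      exact ih (k + 1) (fun j h1 h2 => h j (by omega) (by omega))

theorem firstRot_found (a b : List Char) (fuel : Nat) :
    ∀ k j0, k ≤ j0 → j0 < k + fuel → b.drop j0 ++ b.take j0 = a →
      (∀ i, k ≤ i → i < j0 → b.drop i ++ b.take i ≠ a) → firstRot a b k fuel = (j0 : Int) := by
  induction fuel with
  | zero => intro k j0 h1 h2 _ _; omega
  | succ m ih =>
      intro k j0 h1 h2 h3 h4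
      by_cases hk : b.drop k ++ b.take k = a
      · have : k = j0 := by
          by_contra hne
          exact h4 k le_rfl (by omega) hk
        subst this
        simp [firstRot, hk]
      · simp only [firstRot, if_neg hk]
        have hkj : k ≠ j0 := fun he => hk (he ▸ h3)
        exact ih (k + 1) j0 (by omega) (by omega) h3 (fun i hi1 hi2 => h4 i (by omega) hi2)

theorem solGo_eq (a b : List Char) (fuel : Nat) :
    ∀ k, k + fuel = b.length →
      solGo a b (PySem.List.pyRange ((k : Int) + 1) ((b.length : Int) + 1)) (k : Int)
        (b.drop k ++ b.take k) = firstRot a b k fuel := by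
  induction fuel with
  | zero =>
      intro k hk
      have hempty : PySem.List.pyRange ((k : Int) + 1) ((b.length : Int) + 1) = [] := by
        subst hk
        simp [PySem.List.pyRange]
      rw [hempty]
      rfl
  | succ m ih =>
      intro k hk
      rw [PySem.List.pyRange_one_cons (by omega : (k : Int) + 1 < (b.length : Int) + 1)]
      by_cases hrot : b.drop k ++ b.take k = a
      · simp [solGo, firstRot, hrot]
      · simp only [solGo, firstRot, if_neg hrot]
        have hs1 : PySem.List.slice b (some ((k : Int) + 1)) none = b.drop (k + 1) := by
          rw [PySem.List.slice_from b (by omega : (0:Int) ≤ (k : Int) + 1)]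
          norm_num
        have hs2 : PySem.List.slice b none (some ((k : Int) + 1)) = b.take (k + 1) := by
          rw [PySem.List.slice_to b (by omega : (0:Int) ≤ (k : Int) + 1)]
          norm_num
        rw [hs1, hs2]
        have := ih (k + 1) (by omega)
        push_cast at this ⊢
        exact this

theorem solution_eq_firstRot (A B : String) :
    solution A B = firstRot A.toList B.toList 0 B.toList.length := by
  unfold solution
  have h0 := solGo_eq A.toList B.toList B.toList.length 0 (by omega)
  simpa [PySem.Str.len_eq, PySem.Str.len] using h0

theorem rot_length (b : List Char) (j : Nat) (hj : j ≤ b.length) :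
    (b.drop j ++ b.take j).length = b.length := by
  simp [List.length_append, List.length_drop, List.length_take]
  omega

theorem prefix_rot (a b : List Char) (j : Nat) (hj : j ≤ b.length) (ha : a.length = b.length) :
    a <+: (b ++ b).drop j ↔ a = b.drop j ++ b.take j := by
  have hdrop : (b ++ b).drop j = b.drop j ++ b := List.drop_append_of_le_length hj
  have htake : List.take b.length (List.drop j b ++ b) = List.drop j b ++ List.take j b := by
    rw [List.take_append]
    have h1 : (b.drop j).take b.length = b.drop j := List.take_of_length_le (by simp)
    have h2 : b.length - (b.drop j).length = j := by simp [List.length_drop]; omega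
    rw [h1, h2]
  rw [hdrop, List.prefix_iff_eq_take, ha, htake]

theorem find_eq_firstRot (a b : List Char) (hb : b ≠ []) (ha : a.length = b.length) :
    PySem.Chars.find (b ++ b) a = firstRot a b 0 b.length := by
  by_cases h0 : 0 ≤ PySem.Chars.find (b ++ b) a
  · obtain ⟨hpre, hmin⟩ := PySem.Chars.find_spec h0
    set j0 := (PySem.Chars.find (b ++ b) a).toNat with hj0
    have hle : PySem.Chars.find (b ++ b) a ≤ ((b ++ b).length : Int) :=
      PySem.Chars.find_le_length _ _
    have hj02 : j0 ≤ (b ++ b).length := Int.toNat_le.2 hle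
    have hlen : a.length ≤ ((b ++ b).drop j0).length := hpre.length_le
    have hjn : j0 ≤ b.length := by
      rw [List.length_drop, List.length_append] at hlen
      rw [List.length_append] at hj02
      omega
    have hne : j0 ≠ b.length := by
      intro hEq
      have hab : a = b := by
        have := (prefix_rot a b j0 hjn ha).1 hpre
        simpa [hEq] using this
      have h00 : a <+: (b ++ b).drop 0 := by
        rw [prefix_rot a b 0 (by omega) ha]
        simpa using hab
      have hpos : 0 < j0 := by
        rcases Nat.eq_zero_or_pos j0 with h | h
        · exact absurd (List.eq_nil_of_length_eq_zero (by omega)) hb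
        · exact h
      exact hmin 0 hpos h00
    have hjlt : j0 < b.length := by omega
    have hrot : b.drop j0 ++ b.take j0 = a := ((prefix_rot a b j0 hjn ha).1 hpre).symm
    have hmins : ∀ i, 0 ≤ i → i < j0 → b.drop i ++ b.take i ≠ a := by
      intro i _ hi hEq
      exact hmin i hi ((prefix_rot a b i (by omega) ha).2 hEq.symm)
    rw [firstRot_found a b b.length 0 j0 (by omega) (by omega) hrot hmins]
    exact (Int.toNat_of_nonneg h0).symm
  · have hneg : PySem.Chars.find (b ++ b) a = -1 := by
      have := PySem.Chars.neg_one_le_find (b ++ b) a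
      omega
    rw [hneg]
    have hnotin : ¬ a <:+: (b ++ b) := (PySem.Chars.find_eq_neg_one_iff _ _).1 hneg
    symm
    apply firstRot_none
    intro j h1 h2 hEq
    apply hnotin
    rw [← PySem.Chars.isIn_iff_infix, ← PySem.Chars.exists_prefix_drop_iff_isIn]
    exact ⟨j, (prefix_rot a b j (by omega) ha).2 hEq.symm⟩

-- ===== VERDICT (by name: the statement is the Claim_ definition above) =====
theorem solution_spec : Claim_unchanged_solution := by
  intro A B _ hD
  rw [solution_eq_firstRot]
  unfold solution_alt
  by_cases hlen : PySem.Str.len A ≠ PySem.Str.len B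
  · rw [if_pos hlen]
    apply firstRot_none
    intro j h1 h2 hEq
    apply hlen
    rw [PySem.Str.len_eq, PySem.Str.len_eq, ← hEq,
      rot_length B.toList j (by omega)]
  · rw [if_neg hlen]
    push Not at hlen
    have hlen' : A.toList.length = B.toList.length := by
      have := hlen
      rw [PySem.Str.len_eq, PySem.Str.len_eq] at this
      exact_mod_cast this
    have hb : B.toList ≠ [] := by
      intro hBnil
      apply hD
      have hB : B = "" := String.toList_eq_nil_iff.mp hBnil
      have hA : A = "" := by
        apply String.toList_eq_nil_iff.mp
        rw [hBnil] at hlen'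
        exact List.eq_nil_of_length_eq_zero (by simpa using hlen')
      exact ⟨hA, hB⟩
    exact (find_eq_firstRot A.toList B.toList hb hlen').symm

theorem solution_changed : Claim_changed_solution := by
  unfold Claim_changed_solution; decide

theorem solution_tight : Claim_exact_solution := by
  intro A B _ hD
  obtain ⟨hA, hB⟩ := hD
  subst hA; subst hB
  decide
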